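-- pv_equiv track=rewrite | github.com/hauteuar/research_agent | opulence_api/agents/code_parser_agent_api.py | _categorize_data_item
-- ===== SOURCE A (Python) =====
-- def _categorize_data_item(name: str, definition: str) -> str:
--     """Categorize data item by business purpose"""
--     name_upper = name.upper()
--     def_upper = definition.upper()
--
--     # Common business data patterns
--     if any(pattern in name_upper for pattern in ['AMOUNT', 'AMT', 'TOTAL', 'SUM']):
--         return 'financial'
--     elif any(pattern in name_upper for pattern in ['DATE', 'TIME', 'TIMESTAMP']):
--         return 'temporal'
--     elif any(pattern in name_upper for pattern in ['NAME', 'ADDR', 'ADDRESS', 'PHONE']):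
--         return 'personal_data'
--     elif any(pattern in name_upper for pattern in ['ID', 'KEY', 'NBR', 'NUMBER']):
--         return 'identifier'
--     elif any(pattern in name_upper for pattern in ['STATUS', 'FLAG', 'IND', 'INDICATOR']):
--         return 'control'
--     elif any(pattern in name_upper for pattern in ['CTR', 'COUNTER', 'CNT', 'COUNT']):
--         return 'counter'
--     elif 'FILLER' in name_upper:
--         return 'filler'
--     else:
--         return 'business_data'
-- ===== SOURCE B (Python) =====
-- _PATTERN_RANK = [
--     ('AMOUNT', 0), ('AMT', 0), ('TOTAL', 0), ('SUM', 0),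
--     ('DATE', 1), ('TIME', 1), ('TIMESTAMP', 1),
--     ('NAME', 2), ('ADDR', 2), ('ADDRESS', 2), ('PHONE', 2),
--     ('ID', 3), ('KEY', 3), ('NBR', 3), ('NUMBER', 3),
--     ('STATUS', 4), ('FLAG', 4), ('IND', 4), ('INDICATOR', 4),
--     ('CTR', 5), ('COUNTER', 5), ('CNT', 5), ('COUNT', 5),
--     ('FILLER', 6),
-- ]
-- _CATEGORIES = ['financial', 'temporal', 'personal_data', 'identifier',
--                'control', 'counter', 'filler', 'business_data']
--
-- def _categorize_data_item(name: str, definition: str) -> str: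
--     name_upper = name.upper()
--     def_upper = definition.upper()  # kept: A computes it too (unused)
--     best = 7
--     for pattern, rank in _PATTERN_RANK:
--         if pattern in name_upper:
--             best = min(best, rank)
--     return _CATEGORIES[best]
-- ===== Notes on version B (the rewrite author's own statement) =====
-- stated objective: alternative
-- what changed: B replaces the priority if/elif chain over category groups by a min-rank reduction: one fold over a flat (pattern, rank) list computes the minimum rank among all matching patterns, and that rank indexes a category array (no grouping, no early return).
import Mathlib
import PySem

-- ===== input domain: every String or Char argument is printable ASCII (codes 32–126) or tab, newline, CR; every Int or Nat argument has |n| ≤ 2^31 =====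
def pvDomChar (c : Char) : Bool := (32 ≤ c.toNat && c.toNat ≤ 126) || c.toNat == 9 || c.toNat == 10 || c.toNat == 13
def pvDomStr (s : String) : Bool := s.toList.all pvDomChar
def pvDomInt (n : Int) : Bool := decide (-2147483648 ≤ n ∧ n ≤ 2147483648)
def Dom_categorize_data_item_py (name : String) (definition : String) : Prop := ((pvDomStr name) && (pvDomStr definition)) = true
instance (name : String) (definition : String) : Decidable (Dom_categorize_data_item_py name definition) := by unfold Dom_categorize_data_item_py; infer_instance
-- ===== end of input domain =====

-- B replaces the priority if/elif chain by a min-rank reduction over a flat (pattern, rank)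
-- list indexing a category array (objective: alternative, same cost).
-- ===== PORT A =====
def categorize_data_item_py (name : String) (definition : String) : String :=
  let name_upper := PySem.Str.upper name
  let _def_upper := PySem.Str.upper definition
  if ["AMOUNT", "AMT", "TOTAL", "SUM"].any (fun pattern => PySem.Str.isIn pattern name_upper) then "financial"
  else if ["DATE", "TIME", "TIMESTAMP"].any (fun pattern => PySem.Str.isIn pattern name_upper) then "temporal"
  else if ["NAME", "ADDR", "ADDRESS", "PHONE"].any (fun pattern => PySem.Str.isIn pattern name_upper) then "personal_data"
  else if ["ID", "KEY", "NBR", "NUMBER"].any (fun pattern => PySem.Str.isIn pattern name_upper) then "identifier"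
  else if ["STATUS", "FLAG", "IND", "INDICATOR"].any (fun pattern => PySem.Str.isIn pattern name_upper) then "control"
  else if ["CTR", "COUNTER", "CNT", "COUNT"].any (fun pattern => PySem.Str.isIn pattern name_upper) then "counter"
  else if PySem.Str.isIn "FILLER" name_upper then "filler"
  else "business_data"

-- ===== PORT B =====
def pvPatternRank : List (String × Nat) :=
  [("AMOUNT", 0), ("AMT", 0), ("TOTAL", 0), ("SUM", 0),
   ("DATE", 1), ("TIME", 1), ("TIMESTAMP", 1),
   ("NAME", 2), ("ADDR", 2), ("ADDRESS", 2), ("PHONE", 2),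
   ("ID", 3), ("KEY", 3), ("NBR", 3), ("NUMBER", 3),
   ("STATUS", 4), ("FLAG", 4), ("IND", 4), ("INDICATOR", 4),
   ("CTR", 5), ("COUNTER", 5), ("CNT", 5), ("COUNT", 5),
   ("FILLER", 6)]

def pvCategories : List String :=
  ["financial", "temporal", "personal_data", "identifier",
   "control", "counter", "filler", "business_data"]

-- the Source B loop: best = min(best, rank) whenever pattern occurs in name_upper
def pvBest (nu : String) : List (String × Nat) → Nat → Nat
  | [], best => best
  | (p, r) :: rest, best =>
    pvBest nu rest (if PySem.Str.isIn p nu then min best r else best)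

def categorize_data_item_py_alt (name : String) (definition : String) : String :=
  let name_upper := PySem.Str.upper name
  let _def_upper := PySem.Str.upper definition
  pvCategories.getD (pvBest name_upper pvPatternRank 7) "business_data"

-- ===== PRECONDITION & SPEC =====
def Spec_categorize_data_item_py (name : String) (definition : String) (out : String) : Prop := out = categorize_data_item_py_alt name definition
instance (name : String) (definition : String) (out : String) : Decidable (Spec_categorize_data_item_py name definition out) := by unfold Spec_categorize_data_item_py; infer_instance

-- ===== CLAIM (what is proved, stated in full; the proofs are below) =====
def Claim_equal_categorize_data_item_py : Prop := ∀ (name : String) (definition : String), Dom_categorize_data_item_py name definition → Spec_categorize_data_item_py name definition (categorize_data_item_py name definition)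

-- ===== LEMMAS AND PROOFS =====

theorem pvBest_le_acc (nu : String) (l : List (String × Nat)) (b : Nat) :
    pvBest nu l b ≤ b := by
  induction l generalizing b with
  | nil => simp [pvBest]
  | cons pr rest ih =>
    obtain ⟨p, r⟩ := pr
    simp only [pvBest]
    split
    · exact le_trans (ih _) (Nat.min_le_left _ _)
    · exact ih _

theorem pvBest_le_of_match (nu p : String) (r : Nat) (l : List (String × Nat)) (b : Nat)
    (hmem : (p, r) ∈ l) (hm : PySem.Str.isIn p nu = true) :
    pvBest nu l b ≤ r := by
  induction l generalizing b with
  | nil => cases hmem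
  | cons pr rest ih =>
    obtain ⟨q, s⟩ := pr
    rcases List.mem_cons.mp hmem with h | h
    · injection h with hq hs
      subst hq; subst hs
      simp only [pvBest, hm, if_true]
      exact le_trans (pvBest_le_acc nu rest _) (Nat.min_le_right _ _)
    · simp only [pvBest]
      split
      · exact ih _ h
      · exact ih _ h

theorem pvBest_lb (nu : String) (k : Nat) (l : List (String × Nat)) (b : Nat)
    (hl : ∀ pr ∈ l, PySem.Str.isIn pr.1 nu = true → k ≤ pr.2) (hb : k ≤ b) :
    k ≤ pvBest nu l b := by
  induction l generalizing b with
  | nil => simpa [pvBest] using hb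
  | cons pr rest ih =>
    obtain ⟨p, r⟩ := pr
    simp only [pvBest]
    have hrest : ∀ pr ∈ rest, PySem.Str.isIn pr.1 nu = true → k ≤ pr.2 :=
      fun pr h => hl pr (List.mem_cons_of_mem _ h)
    split
    · rename_i hm
      exact ih _ hrest (le_min hb (hl (p, r) List.mem_cons_self hm))
    · exact ih _ hrest hb

-- ===== VERDICT (by name: the statement is the Claim_ definition above) =====
theorem categorize_data_item_py_spec : Claim_equal_categorize_data_item_py := by
  intro name definition hdom
  clear hdom
  unfold Spec_categorize_data_item_py categorize_data_item_py categorize_data_item_py_alt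
  set nu := PySem.Str.upper name with hnu
  dsimp only
  split_ifs with h0 h1 h2 h3 h4 h5 h6 <;>
    simp only [List.any_cons, List.any_nil, Bool.or_false, Bool.or_eq_true,
      not_or, Bool.not_eq_true] at * <;>
    [skip; skip; skip; skip; skip; skip; skip; skip]
  · -- branch 0: "financial"
    have hb : pvBest nu pvPatternRank 7 = 0 := by
      refine Nat.le_antisymm ?_ ?_
      · rcases h0 with hm|hm|hm|hm
        all_goals exact pvBest_le_of_match nu _ 0 _ 7 (by decide) hm
      · exact Nat.zero_le _
    rw [hb]; rfl
  · -- branch 1: "temporal"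
    have hb : pvBest nu pvPatternRank 7 = 1 := by
      refine Nat.le_antisymm ?_ ?_
      · rcases h1 with hm|hm|hm
        all_goals exact pvBest_le_of_match nu _ 1 _ 7 (by decide) hm
      · refine pvBest_lb nu 1 _ 7 ?_ (by omega)
        intro pr hpr hm
        fin_cases hpr <;> first | omega | simp_all
    rw [hb]; rfl
  · -- branch 2: "personal_data"
    have hb : pvBest nu pvPatternRank 7 = 2 := by
      refine Nat.le_antisymm ?_ ?_
      · rcases h2 with hm|hm|hm|hm
        all_goals exact pvBest_le_of_match nu _ 2 _ 7 (by decide) hm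
      · refine pvBest_lb nu 2 _ 7 ?_ (by omega)
        intro pr hpr hm
        fin_cases hpr <;> first | omega | simp_all
    rw [hb]; rfl
  · -- branch 3: "identifier"
    have hb : pvBest nu pvPatternRank 7 = 3 := by
      refine Nat.le_antisymm ?_ ?_
      · rcases h3 with hm|hm|hm|hm
        all_goals exact pvBest_le_of_match nu _ 3 _ 7 (by decide) hm
      · refine pvBest_lb nu 3 _ 7 ?_ (by omega)
        intro pr hpr hm
        fin_cases hpr <;> first | omega | simp_all
    rw [hb]; rfl
  · -- branch 4: "control"
    have hb : pvBest nu pvPatternRank 7 = 4 := by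
      refine Nat.le_antisymm ?_ ?_
      · rcases h4 with hm|hm|hm|hm
        all_goals exact pvBest_le_of_match nu _ 4 _ 7 (by decide) hm
      · refine pvBest_lb nu 4 _ 7 ?_ (by omega)
        intro pr hpr hm
        fin_cases hpr <;> first | omega | simp_all
    rw [hb]; rfl
  · -- branch 5: "counter"
    have hb : pvBest nu pvPatternRank 7 = 5 := by
      refine Nat.le_antisymm ?_ ?_
      · rcases h5 with hm|hm|hm|hm
        all_goals exact pvBest_le_of_match nu _ 5 _ 7 (by decide) hm
      · refine pvBest_lb nu 5 _ 7 ?_ (by omega)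
        intro pr hpr hm
        fin_cases hpr <;> first | omega | simp_all
    rw [hb]; rfl
  · -- branch 6: "filler"
    have hb : pvBest nu pvPatternRank 7 = 6 := by
      refine Nat.le_antisymm ?_ ?_
      · exact pvBest_le_of_match nu _ 6 _ 7 (by decide) h6
      · refine pvBest_lb nu 6 _ 7 ?_ (by omega)
        intro pr hpr hm
        fin_cases hpr <;> first | omega | simp_all
    rw [hb]; rfl
  · -- no pattern matched: "business_data"
    have hb : pvBest nu pvPatternRank 7 = 7 := by
      refine Nat.le_antisymm (pvBest_le_acc nu _ 7) ?_
      refine pvBest_lb nu 7 _ 7 ?_ le_rfl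
      intro pr hpr hm
      fin_cases hpr <;> first | omega | simp_all
    rw [hb]; rfl
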